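-- pv_equiv track=rewrite | github.com/YarelOr-dn/drivenets-topology-studio | scaler/wizard/interfaces.py | group_pwhe_subinterfaces_by_parent
-- ===== SOURCE A (Python) =====
-- from typing import Any, Dict, List, Tuple
--
-- def group_pwhe_subinterfaces_by_parent(interfaces: List[str]) -> Dict[str, List[str]]:
--     """Group phX.Y interfaces by their parent phX.
--
--     Only includes PWHE sub-interfaces (phX.Y format), not parent interfaces (phX).
--
--     Args:
--         interfaces: List of interface names (can include non-PWHE interfaces)
--
--     Returns:
--         Dict mapping parent to list of sub-interfaces: {'ph1': ['ph1.1', 'ph1.2'], 'ph2': ['ph2.1']}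
--     """
--     grouped = {}
--
--     for iface in interfaces:
--         # Only process PWHE sub-interfaces (phX.Y format)
--         if not iface.lower().startswith('ph'):
--             continue
--
--         # Must have a dot to be a sub-interface
--         if '.' not in iface:
--             continue
--
--         # Extract parent (everything before the dot)
--         parent = iface.split('.')[0]
--
--         if parent not in grouped:
--             grouped[parent] = []
--         grouped[parent].append(iface)
--
--     # Sort sub-interfaces within each parent numerically
--     for parent in grouped:
--         grouped[parent].sort(key=lambda x: int(x.split('.')[1]) if x.split('.')[1].isdigit() else 0)
--
--     return grouped
-- ===== SOURCE B (Python) =====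
-- def group_pwhe_subinterfaces_by_parent(interfaces):
--     """Group phX.Y interfaces by parent: filter once, then build each parent's
--     sorted group directly from the filtered list at first occurrence."""
--     keep = [i for i in interfaces if i.lower().startswith('ph') and '.' in i]
--
--     def num(x):
--         s = x.split('.')[1]
--         return int(s) if s.isdigit() else 0
--
--     result = {}
--     for iface in keep:
--         parent = iface.split('.')[0]
--         if parent not in result:
--             result[parent] = sorted((j for j in keep if j.split('.')[0] == parent), key=num)
--     return result
-- ===== Notes on version B (the rewrite author's own statement) =====
-- stated objective: alternative
-- what changed: A builds a dict of lists by appending during one pass and then runs a second pass over the dict sorting each value in place; B filters once into a list and, at each parent's first occurrence, builds that parent's group directly as a sorted comprehension over the filtered list, so the append-then-sort dict mutation disappears.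
import Mathlib
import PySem

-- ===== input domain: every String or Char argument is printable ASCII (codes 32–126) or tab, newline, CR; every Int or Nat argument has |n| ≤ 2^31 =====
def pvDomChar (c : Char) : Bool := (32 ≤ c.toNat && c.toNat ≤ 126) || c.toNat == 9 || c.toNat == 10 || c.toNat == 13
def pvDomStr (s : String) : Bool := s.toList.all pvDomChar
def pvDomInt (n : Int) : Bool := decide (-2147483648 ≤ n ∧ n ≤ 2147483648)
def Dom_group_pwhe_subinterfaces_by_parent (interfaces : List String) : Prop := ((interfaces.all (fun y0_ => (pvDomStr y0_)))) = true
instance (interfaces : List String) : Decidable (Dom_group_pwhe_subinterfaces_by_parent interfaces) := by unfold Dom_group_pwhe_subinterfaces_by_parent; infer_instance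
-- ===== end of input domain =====

-- B replaces A's build-dict-of-lists-then-sort-each-value passes by a single filtered list
-- from which each parent's sorted group is built directly at its first occurrence (objective: alternative decomposition, not faster).

-- ===== PORT A =====
-- shared textual pieces of both Pythons:
-- pvPar s = s.split('.')[0]  (split('.') is never empty, so headD "" is exact)
def pvPar (s : String) : String := ((PySem.Str.split? s ".").getD []).headD ""
-- pvNum x = int(x.split('.')[1]) if x.split('.')[1].isdigit() else 0
-- (only applied where '.' ∈ x, so index 1 exists and getD "" is exact; on an
--  all-digit ASCII string int() succeeds, so getD 0 is exact)
def pvNum (x : String) : Int :=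
  let t := ((PySem.Str.split? x ".").getD []).getD 1 ""
  if PySem.Str.strIsdigit t then (PySem.Int.ofStr? t).getD 0 else 0

def group_pwhe_subinterfaces_by_parent (interfaces : List String) : List (String × List String) :=
  let grouped := interfaces.foldl (fun (d : PySem.Dict String (List String)) iface =>
    if !(PySem.Str.startswith (PySem.Str.lower iface) "ph") then d      -- continue
    else if !(PySem.Str.isIn "." iface) then d                          -- continue
    else
      let parent := pvPar iface
      let d := if d.contains parent then d else d.insert parent ([] : List String)
      d.modify parent [] (fun v => v ++ [iface])) PySem.Dict.empty      -- grouped[parent].append(iface)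
  -- for parent in grouped: grouped[parent].sort(key=…)
  let grouped := grouped.keys.foldl (fun d parent =>
    d.modify parent [] (fun v => PySem.List.sorted v pvNum false)) grouped
  grouped.items

-- ===== PORT B =====
def group_pwhe_subinterfaces_by_parent_alt (interfaces : List String) : List (String × List String) :=
  let keep := interfaces.filter (fun i =>
    PySem.Str.startswith (PySem.Str.lower i) "ph" && PySem.Str.isIn "." i)
  let result := keep.foldl (fun (d : PySem.Dict String (List String)) iface =>
    let parent := pvPar iface
    if d.contains parent then d
    else d.insert parent
      (PySem.List.sorted (keep.filter (fun j => pvPar j == parent)) pvNum false)) PySem.Dict.empty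
  result.items

-- ===== PRECONDITION & SPEC =====
def Spec_group_pwhe_subinterfaces_by_parent (interfaces : List String) (out : List (String × List String)) : Prop := out = group_pwhe_subinterfaces_by_parent_alt interfaces
instance (interfaces : List String) (out : List (String × List String)) : Decidable (Spec_group_pwhe_subinterfaces_by_parent interfaces out) := by unfold Spec_group_pwhe_subinterfaces_by_parent; infer_instance

-- ===== CLAIM (what is proved, stated in full; the proofs are below) =====
def Claim_equal_group_pwhe_subinterfaces_by_parent : Prop := ∀ (interfaces : List String), Dom_group_pwhe_subinterfaces_by_parent interfaces → Spec_group_pwhe_subinterfaces_by_parent interfaces (group_pwhe_subinterfaces_by_parent interfaces)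

-- ===== LEMMAS AND PROOFS =====

-- the filter predicate shared by both sides
def pvKeepP (i : String) : Bool :=
  PySem.Str.startswith (PySem.Str.lower i) "ph" && PySem.Str.isIn "." i

-- A's grouping step, with the two `continue` guards folded into one test,
-- and the "ensure key then append" collapsed to a single modify.
theorem pvStepA_eq (d : PySem.Dict String (List String)) (x : String) :
    (if !(PySem.Str.startswith (PySem.Str.lower x) "ph") then d
     else if !(PySem.Str.isIn "." x) then d
     else
       let parent := pvPar x
       let d := if d.contains parent then d else d.insert parent ([] : List String)
       d.modify parent [] (fun v => v ++ [x]))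
    = if pvKeepP x then d.modify (pvPar x) [] (fun v => v ++ [x]) else d := by
  unfold pvKeepP
  cases h1 : PySem.Str.startswith (PySem.Str.lower x) "ph" <;>
    cases h2 : PySem.Str.isIn "." x <;> simp
  cases hc : d.contains (pvPar x) with
  | true => simp
  | false =>
    simp [PySem.Dict.modify, PySem.Dict.insert_insert_self,
      PySem.Dict.getD_insert_self, PySem.Dict.getD_of_not_contains d _ hc]

-- A's grouping dict, as a fold of modifies over the kept list
theorem pvGroupA_eq (interfaces : List String) :
    interfaces.foldl (fun (d : PySem.Dict String (List String)) iface =>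
      if !(PySem.Str.startswith (PySem.Str.lower iface) "ph") then d
      else if !(PySem.Str.isIn "." iface) then d
      else
        let parent := pvPar iface
        let d := if d.contains parent then d else d.insert parent ([] : List String)
        d.modify parent [] (fun v => v ++ [iface])) PySem.Dict.empty
    = (interfaces.filter pvKeepP).foldl
        (fun d x => d.modify (pvPar x) [] (fun v => v ++ [x])) PySem.Dict.empty := by
  rw [← PySem.List.foldl_if_eq_foldl_filter pvKeepP]
  exact PySem.List.foldl_congr_mem _ _ _ _ (fun acc x _ => pvStepA_eq acc x)

-- value of the grouping dict at any key
theorem pvGroupA_getD (ks : List String) (p : String) :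
    (ks.foldl (fun (d : PySem.Dict String (List String)) x =>
        d.modify (pvPar x) [] (fun v => v ++ [x])) PySem.Dict.empty).getD p []
    = ks.filter (fun x => pvPar x == p) := by
  have h := PySem.Dict.getD_foldl_modify_append
      (ks.map (fun x => ((pvPar x : String), x))) PySem.Dict.empty p
  rw [List.foldl_map] at h
  simpa [List.filter_map, Function.comp_def, List.map_map] using h

-- sorting loop over a Nodup key list: pointwise effect on getD
theorem pvSortLoop_getD (ps : List String) (hnd : ps.Nodup)
    (d : PySem.Dict String (List String)) (k : String) :
    (ps.foldl (fun d p => d.modify p [] (fun v => PySem.List.sorted v pvNum false)) d).getD k []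
    = if k ∈ ps then PySem.List.sorted (d.getD k []) pvNum false else d.getD k [] := by
  induction ps generalizing d with
  | nil => simp
  | cons p ps ih =>
    simp only [List.foldl_cons]
    rw [ih (by simpa using hnd.of_cons)]
    by_cases hk : k = p
    · subst hk
      have : k ∉ ps := by simpa using (List.nodup_cons.mp hnd).1
      simp [this]
    · by_cases hmem : k ∈ ps <;> simp [PySem.Dict.getD_modify, hk, hmem]

-- Set.update of a set with itself is itself
theorem pvSetUpdateSelf (s : PySem.Set String) : PySem.Set.update s s = s := by
  rw [PySem.Set.update_eq_append_filter]
  have h : (PySem.Set.ofList s).filter (fun y => !(PySem.Set.contains s y)) = [] := by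
    rw [List.filter_eq_nil_iff]
    intro y hy
    have : y ∈ s := (PySem.Set.mem_ofList s y).mp hy
    simp [this]
  rw [h, List.append_nil]

-- B's fold: items of the "insert if fresh" loop
theorem pvB_items (key : String → String) (v : String → List String) (l : List String) :
    ∀ (d : PySem.Dict String (List String)),
    (l.foldl (fun d x =>
        if d.contains (key x) then d else d.insert (key x) (v (key x))) d).items
    = d.items ++ ((PySem.Set.ofList (l.map key)).filter
        (fun p => !(d.contains p))).map (fun p => (p, v p)) := by
  induction l with
  | nil => simp
  | cons x l ih =>
    intro d
    simp only [List.foldl_cons, List.map_cons, PySem.Set.ofList_cons]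
    by_cases hc : d.contains (key x) = true
    · rw [if_pos hc, ih d]
      simp only [List.filter_cons, hc, Bool.not_true, PySem.Set.discard, List.filter_filter]
      congr 2
      refine (List.filter_congr ?_).symm
      intro y _
      by_cases hy : y = key x
      · subst hy; simp [hc]
      · simp [hy]
    · replace hc : d.contains (key x) = false := by simpa using hc
      rw [if_neg (by simp [hc]), ih]
      rw [PySem.Dict.items_insert_of_not_contains d _ hc]
      simp only [List.filter_cons, hc, Bool.not_false,
        PySem.Set.discard, List.filter_filter, List.append_assoc, List.singleton_append]
      congr 3
      refine List.filter_congr ?_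
      intro y _
      simp [PySem.Dict.contains_insert, Bool.not_or, Bool.and_comm]

theorem group_pwhe_spec_aux (interfaces : List String) :
    group_pwhe_subinterfaces_by_parent interfaces
    = group_pwhe_subinterfaces_by_parent_alt interfaces := by
  unfold group_pwhe_subinterfaces_by_parent group_pwhe_subinterfaces_by_parent_alt
  have hkb : interfaces.filter (fun i =>
      PySem.Str.startswith (PySem.Str.lower i) "ph" && PySem.Str.isIn "." i)
      = interfaces.filter pvKeepP := rfl
  rw [pvGroupA_eq, hkb]
  set keep := interfaces.filter pvKeepP with hkeep
  set g : PySem.Dict String (List String) := keep.foldl (fun d x =>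
      d.modify (pvPar x) [] (fun v => v ++ [x])) PySem.Dict.empty with hg
  -- keys and Nodup of the grouping dict
  have hkeys : g.keys = PySem.Set.ofList (keep.map pvPar) := by
    have := PySem.Dict.keys_foldl_modify_key keep pvPar ([] : List String)
      (fun _ x => (fun v => v ++ [x])) PySem.Dict.empty
    simpa [PySem.Set.update_nil_left, hg] using this
  have hnd : g.keys.Nodup := PySem.Dict.nodup_keys_foldl_modify_key keep pvPar
    ([] : List String) (fun _ x => (fun v => v ++ [x])) PySem.Dict.empty (by simp)
  -- the sorting loop: keys unchanged, Nodup preserved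
  set g2 : PySem.Dict String (List String) := g.keys.foldl (fun d parent =>
      d.modify parent [] (fun v => PySem.List.sorted v pvNum false)) g with hg2
  have hkeys2 : g2.keys = g.keys := by
    have := PySem.Dict.keys_foldl_modify_key g.keys (fun p => p) ([] : List String)
      (fun _ _ => (fun v => PySem.List.sorted v pvNum false)) g
    simpa [hg2, pvSetUpdateSelf] using this
  -- A's items, pointwise
  have hA : g2.items = g.keys.map (fun k =>
      (k, PySem.List.sorted (keep.filter (fun x => pvPar x == k)) pvNum false)) := by
    rw [PySem.Dict.items_eq_map_keys g2 (hkeys2 ▸ hnd) [], hkeys2]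
    refine List.map_congr_left ?_
    intro k hk
    rw [hg2, pvSortLoop_getD g.keys hnd g k, if_pos hk, hg, pvGroupA_getD]
  -- B's items
  have hB : (keep.foldl (fun (d : PySem.Dict String (List String)) iface =>
      if d.contains (pvPar iface) then d
      else d.insert (pvPar iface)
        (PySem.List.sorted (keep.filter (fun j => pvPar j == pvPar iface)) pvNum false))
      PySem.Dict.empty).items
      = (PySem.Set.ofList (keep.map pvPar)).map (fun p =>
        (p, PySem.List.sorted (keep.filter (fun j => pvPar j == p)) pvNum false)) := by
    have := pvB_items pvPar (fun p =>
      PySem.List.sorted (keep.filter (fun j => pvPar j == p)) pvNum false) keep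
      PySem.Dict.empty
    simpa using this
  rw [hA, hB, hkeys]

-- ===== VERDICT (by name: the statement is the Claim_ definition above) =====
theorem group_pwhe_subinterfaces_by_parent_spec : Claim_equal_group_pwhe_subinterfaces_by_parent := by
  intro interfaces _
  unfold Spec_group_pwhe_subinterfaces_by_parent
  exact group_pwhe_spec_aux interfaces
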